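-- pv_equiv track=rewrite | github.com/Krishn1101/Problems-on-Python | Divisor_Product.py | divisorProduct
-- ===== SOURCE A (Python) =====
-- def divisorProduct(N):
--     prod = 1
--     i = 1
--
--     while i * i <= N:
--         if N % i == 0:
--             prod *= i
--
--             if i != N // i:
--                 prod *= (N // i)
--         i += 1
--
--     return prod%((10**9)+7)
-- ===== SOURCE B (Python) =====
-- def divisorProduct(N):
--     # product of all divisors of N is N^(t//2) * (sqrt(N) if t is odd), t = number of divisors
--     M = (10 ** 9) + 7
--     if N < 1:
--         return 1 % M
--     cnt = 0   # number of divisors d with d*d <= N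
--     r = 0     # floor sqrt of N
--     i = 1
--     while i * i <= N:
--         if N % i == 0:
--             cnt += 1
--         r = i
--         i += 1
--     t = 2 * cnt - (1 if r * r == N else 0)
--     half = pow(N, t // 2, M)
--     odd = r if t % 2 == 1 else 1
--     return (half * odd) % M
-- ===== Notes on version B (the rewrite author's own statement) =====
-- stated objective: alternative
-- what changed: Instead of multiplying every divisor pair (d, N//d) as A does, B only COUNTS the divisors up to sqrt(N) and returns the closed form N^(t//2) * sqrt(N)^(t mod 2) mod 1e9+7, where t is the number of divisors, computed with one modular pow.
import Mathlib
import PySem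

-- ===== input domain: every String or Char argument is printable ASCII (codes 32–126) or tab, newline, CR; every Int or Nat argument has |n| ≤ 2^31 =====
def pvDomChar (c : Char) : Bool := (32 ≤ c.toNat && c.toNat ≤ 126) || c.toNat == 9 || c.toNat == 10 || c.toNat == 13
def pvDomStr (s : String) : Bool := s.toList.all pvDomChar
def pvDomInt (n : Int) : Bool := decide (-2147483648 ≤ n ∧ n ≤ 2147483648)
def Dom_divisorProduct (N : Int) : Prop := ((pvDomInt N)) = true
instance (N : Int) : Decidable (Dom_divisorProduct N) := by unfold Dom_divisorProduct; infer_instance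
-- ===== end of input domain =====

-- B counts the divisors up to √N and returns the closed form N^(t//2)·√N^(t mod 2) mod 1e9+7 instead of multiplying every divisor pair as A does (alternative algorithm, same cost class).

-- ===== PORT A =====
-- while i*i <= N: if N % i == 0: prod *= i; if i != N//i: prod *= N//i; i += 1
def divisorProductLoop (N : Int) (i : Int) (prod : Int) : Int :=
  if _h : i * i ≤ N then
    divisorProductLoop N (i + 1)
      (if PySem.Int.mod N i = 0 then
        (if i ≠ PySem.Int.floordiv N i then (prod * i) * PySem.Int.floordiv N i else prod * i)
       else prod)
  else prod
termination_by (N + 1 - i).toNat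
decreasing_by
  have hiN : i ≤ N := by nlinarith [mul_self_nonneg i]
  omega

def divisorProduct (N : Int) : Int :=
  PySem.Int.mod (divisorProductLoop N 1 1) (10 ^ 9 + 7)

-- ===== PORT B =====
-- while i*i <= N: if N % i == 0: cnt += 1; r = i; i += 1   (returns (cnt, r))
def divisorProductAltLoop (N : Int) (i : Int) (cnt : Int) (r : Int) : Int × Int :=
  if _h : i * i ≤ N then
    divisorProductAltLoop N (i + 1) (if PySem.Int.mod N i = 0 then cnt + 1 else cnt) i
  else (cnt, r)
termination_by (N + 1 - i).toNat
decreasing_by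
  have hiN : i ≤ N := by nlinarith [mul_self_nonneg i]
  omega

def divisorProduct_alt (N : Int) : Int :=
  if N < 1 then PySem.Int.mod 1 (10 ^ 9 + 7)
  else
    let p := divisorProductAltLoop N 1 0 0
    let t := 2 * p.1 - (if p.2 * p.2 = N then 1 else 0)
    -- here t ≥ 1 (1 divides N), so `.toNat` is exact: Python's pow(N, t//2, M) never sees a negative exponent
    let half := PySem.Int.powMod N (PySem.Int.floordiv t 2).toNat (10 ^ 9 + 7)
    let odd := if PySem.Int.mod t 2 = 1 then p.2 else 1
    PySem.Int.mod (half * odd) (10 ^ 9 + 7)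

-- ===== PRECONDITION & SPEC =====
def Spec_divisorProduct (N : Int) (out : Int) : Prop := out = divisorProduct_alt N
instance (N : Int) (out : Int) : Decidable (Spec_divisorProduct N out) := by unfold Spec_divisorProduct; infer_instance

-- ===== CLAIM (what is proved, stated in full; the proofs are below) =====
def Claim_equal_divisorProduct : Prop := ∀ (N : Int), Dom_divisorProduct N → Spec_divisorProduct N (divisorProduct N)

-- ===== LEMMAS AND PROOFS =====

-- per-element factor of A's loop body
def pvGA (N : Int) (i : Int) : Int :=
  if PySem.Int.mod N i = 0 then
    (if i ≠ PySem.Int.floordiv N i then i * PySem.Int.floordiv N i else i)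
  else 1

-- A's Nat-side paired factor: d·(n/d) for a strictly small divisor, d alone at d = √n
def pvPair (n : Nat) (d : Nat) : Nat := if d * d ≠ n then d * (n / d) else d

theorem pv_foldl_mul (g : Int → Int) : ∀ (l : List Int) (p : Int),
    l.foldl (fun p i => p * g i) p = p * (l.map g).prod := by
  intro l
  induction l with
  | nil => simp
  | cons a t ih => intro p; simp [ih, mul_assoc]

-- the guard i*i ≤ n is exactly i ≤ √n, for i ≥ 1
theorem pv_guard_iff (n : Nat) (i : Int) (hi : 1 ≤ i) :
    (i * i ≤ (n : Int)) ↔ i ≤ (n.sqrt : Int) := by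
  obtain ⟨k, rfl⟩ : ∃ k : Nat, i = ↑k := ⟨i.toNat, (Int.toNat_of_nonneg (by omega)).symm⟩
  constructor
  · intro h
    exact_mod_cast Nat.le_sqrt.mpr (by exact_mod_cast h)
  · intro h
    exact_mod_cast Nat.le_sqrt.mp (by exact_mod_cast h)

-- A's while-loop as a fold over range(i, sqrt(n)+1)
theorem pv_loop_eq (n : Nat) : ∀ (m : Nat) (i prod : Int), 1 ≤ i → ((n.sqrt : Int) + 1 - i).toNat = m →
    divisorProductLoop (n : Int) i prod =
      (PySem.List.pyRange i ((n.sqrt : Int) + 1) 1).foldl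
        (fun p j => if PySem.Int.mod (n : Int) j = 0 then
            (if j ≠ PySem.Int.floordiv (n : Int) j then (p * j) * PySem.Int.floordiv (n : Int) j else p * j)
          else p) prod := by
  intro m
  induction m with
  | zero =>
    intro i prod hi hm
    have hgt : ¬ (i * i ≤ (n : Int)) := by
      rw [pv_guard_iff n i hi]; omega
    rw [divisorProductLoop, dif_neg hgt, PySem.List.pyRange_one_eq_nil (by omega)]; rfl
  | succ m ih =>
    intro i prod hi hm
    have hle : i * i ≤ (n : Int) := by
      rw [pv_guard_iff n i hi]; omega
    rw [divisorProductLoop, dif_pos hle, PySem.List.pyRange_one_cons (by omega)]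
    simp only [List.foldl_cons]
    exact ih (i + 1) _ (by omega) (by omega)

-- B's while-loop: counts the small divisors and records r = √n
theorem pv_altloop_eq (n : Nat) : ∀ (m : Nat) (i cnt r : Int), 1 ≤ i → ((n.sqrt : Int) + 1 - i).toNat = m →
    divisorProductAltLoop (n : Int) i cnt r =
      ((PySem.List.pyRange i ((n.sqrt : Int) + 1) 1).foldl
        (fun c j => if PySem.Int.mod (n : Int) j = 0 then c + 1 else c) cnt,
       if i ≤ (n.sqrt : Int) then (n.sqrt : Int) else r) := by
  intro m
  induction m with
  | zero =>
    intro i cnt r hi hm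
    have hgt : ¬ (i * i ≤ (n : Int)) := by rw [pv_guard_iff n i hi]; omega
    rw [divisorProductAltLoop, dif_neg hgt, PySem.List.pyRange_one_eq_nil (by omega), if_neg (by omega)]
    rfl
  | succ m ih =>
    intro i cnt r hi hm
    have hle : i * i ≤ (n : Int) := by rw [pv_guard_iff n i hi]; omega
    rw [divisorProductAltLoop, dif_pos hle, PySem.List.pyRange_one_cons (by omega)]
    simp only [List.foldl_cons]
    rw [ih (i + 1) _ i (by omega) (by omega)]
    have hiS : i ≤ (n.sqrt : Int) := by rw [← pv_guard_iff n i hi]; exact hle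
    by_cases h2 : i + 1 ≤ (n.sqrt : Int)
    · rw [if_pos h2, if_pos hiS]
    · rw [if_neg h2, if_pos hiS]
      congr 1
      omega

theorem pv_eq_div_iff (n d : Nat) (hd : 1 ≤ d) (hdvd : d ∣ n) :
    d = n / d ↔ d * d = n := by
  obtain ⟨c, hc⟩ := hdvd
  have hcd : n / d = c := by rw [hc]; exact Nat.mul_div_cancel_left c (by omega)
  rw [hcd, hc]
  constructor
  · rintro rfl; rfl
  · intro h; exact Nat.eq_of_mul_eq_mul_left (by omega) h

-- the divisors ≤ √n, inside the full divisor set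
theorem pv_small_set (n : Nat) (hn : 1 ≤ n) :
    (Finset.Ico 1 (n.sqrt + 1)).filter (· ∣ n) =
      ((Finset.Ico 1 (n + 1)).filter (· ∣ n)).filter (fun d => d * d ≤ n) := by
  ext d
  simp only [Finset.mem_filter, Finset.mem_Ico]
  constructor
  · rintro ⟨⟨h1, h2⟩, h3⟩
    have hdd : d * d ≤ n := Nat.le_sqrt.mp (by omega)
    have hdn : d ≤ n := Nat.le_of_dvd (by omega) h3
    exact ⟨⟨⟨h1, by omega⟩, h3⟩, hdd⟩
  · rintro ⟨⟨⟨h1, _⟩, h3⟩, h4⟩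
    have := Nat.le_sqrt.mpr h4
    exact ⟨⟨h1, by omega⟩, h3⟩

-- core pairing fact: the (d, n/d) pairs over divisors ≤ √n multiply to the product of ALL divisors
theorem pv_core (n : Nat) (hn : 1 ≤ n) :
    (∏ d ∈ (Finset.Ico 1 (n.sqrt + 1)).filter (· ∣ n), pvPair n d) =
      ∏ d ∈ (Finset.Ico 1 (n + 1)).filter (· ∣ n), d := by
  rw [pv_small_set n hn, ← Finset.prod_filter_mul_prod_filter_not ((Finset.Ico 1 (n + 1)).filter (· ∣ n))
    (fun d => d * d ≤ n) (fun d => d)]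
  have hsplit : ∀ d ∈ ((Finset.Ico 1 (n + 1)).filter (· ∣ n)).filter (fun d => d * d ≤ n),
      pvPair n d = d * (if d * d ≠ n then n / d else 1) := by
    intro d _
    simp only [pvPair]
    split_ifs <;> simp
  rw [Finset.prod_congr rfl hsplit, Finset.prod_mul_distrib]
  congr 1
  rw [← Finset.prod_filter]
  refine Finset.prod_nbij' (fun d => n / d) (fun d => n / d) ?_ ?_ ?_ ?_ ?_
  · -- a strictly small divisor maps to a large one
    intro d hd
    simp only [Finset.mem_filter, Finset.mem_Ico] at hd ⊢
    obtain ⟨⟨⟨⟨hd1, _⟩, hdvd⟩, hdd⟩, hne⟩ := hd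
    obtain ⟨c, hc⟩ := hdvd
    have hcd : n / d = c := by rw [hc]; exact Nat.mul_div_cancel_left c (by omega)
    have hc1 : 1 ≤ c := Nat.pos_of_ne_zero (by rintro rfl; simp at hc; omega)
    have hdd' : d * d < n := lt_of_le_of_ne hdd hne
    have hlt : d < c := by nlinarith
    rw [hcd]
    exact ⟨⟨⟨by omega, by nlinarith⟩, ⟨d, by rw [hc]; ring⟩⟩, by nlinarith⟩
  · -- a large divisor maps to a strictly small one
    intro d hd
    simp only [Finset.mem_filter, Finset.mem_Ico] at hd ⊢
    obtain ⟨⟨⟨hd1, hd2⟩, hdvd⟩, hgt⟩ := hd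
    obtain ⟨c, hc⟩ := hdvd
    have hcd : n / d = c := by rw [hc]; exact Nat.mul_div_cancel_left c (by omega)
    have hc1 : 1 ≤ c := Nat.pos_of_ne_zero (by rintro rfl; simp at hc; omega)
    have hgt' : n < d * d := Nat.lt_of_not_le hgt
    have hlt : c < d := by nlinarith
    rw [hcd]
    exact ⟨⟨⟨⟨by omega, by omega⟩, ⟨d, by rw [hc]; ring⟩⟩, by nlinarith⟩, by nlinarith⟩
  · intro d hd
    simp only [Finset.mem_filter, Finset.mem_Ico] at hd
    exact Nat.div_div_self hd.1.1.2 (by omega)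
  · intro d hd
    simp only [Finset.mem_filter, Finset.mem_Ico] at hd
    exact Nat.div_div_self hd.1.2 (by omega)
  · intro d hd
    rfl

-- A's Int-side product equals the Nat pair product
theorem pv_A_prod (n : Nat) (_hn : 1 ≤ n) :
    (((PySem.List.pyRange 1 ((n.sqrt : Int) + 1) 1).map (pvGA (n : Int))).prod) =
      ((∏ d ∈ (Finset.Ico 1 (n.sqrt + 1)).filter (· ∣ n), pvPair n d : Nat) : Int) := by
  rw [PySem.List.pyRange_one, List.map_map]
  have hs : (((n.sqrt : Int) + 1 - 1)).toNat = n.sqrt := by omega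
  rw [hs]
  have hL : ((List.range n.sqrt).map (pvGA (n:Int) ∘ fun k : Nat => 1 + (k:Int))).prod
      = ∏ k ∈ Finset.range n.sqrt, pvGA (n:Int) (1 + (k:Int)) := rfl
  rw [hL]
  have hcongr : ∀ k ∈ Finset.range n.sqrt,
      pvGA (n:Int) (1 + (k:Int)) = (((if (1+k) ∣ n then pvPair n (1+k) else 1) : Nat) : Int) := by
    intro k _
    have h1 : (1:ℤ) + (k:ℤ) = ((1+k : ℕ) : ℤ) := by push_cast; ring
    rw [h1]
    have hd1 : 1 ≤ 1 + k := by omega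
    simp only [pvGA]
    have hmod : (PySem.Int.mod (n:Int) (((1+k : ℕ)):Int) = 0) ↔ (1+k) ∣ n := by
      rw [PySem.Int.mod_eq_zero_iff_dvd]; exact Int.natCast_dvd_natCast
    have hfd : PySem.Int.floordiv (n:Int) ((1+k : ℕ):Int) = ((n / (1+k) : Nat) : Int) :=
      PySem.Int.floordiv_natCast n (1+k)
    simp only [hmod, hfd]
    by_cases hdvd : (1+k) ∣ n
    · have hne : (((1+k:ℕ):ℤ) ≠ ((n/(1+k) : ℕ):ℤ)) ↔ ¬ ((1+k) * (1+k) = n) := by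
        rw [not_iff_not, Nat.cast_inj]
        exact pv_eq_div_iff n (1+k) hd1 hdvd
      rw [if_pos hdvd, if_pos hdvd]
      simp only [pvPair]
      by_cases hsq : (1+k) * (1+k) = n
      · rw [if_neg (by rw [hne]; simpa using hsq), if_neg (by simpa using hsq)]
      · rw [if_pos (hne.mpr hsq), if_pos hsq]
        push_cast
        ring
    · rw [if_neg hdvd, if_neg hdvd]
      simp
  rw [Finset.prod_congr rfl hcongr, ← Nat.cast_prod]
  congr 1
  rw [Finset.prod_filter, Finset.prod_Ico_eq_prod_range]
  have hr : n.sqrt + 1 - 1 = n.sqrt := by omega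
  rw [hr]

-- countP over List.range is the card of the filtered Finset.range
theorem pv_countP_card (s : Nat) (q : Nat → Bool) :
    ((List.range s).countP q) = ((Finset.range s).filter (fun k => q k = true)).card := by
  induction s with
  | zero => simp
  | succ s ih =>
    rw [List.range_succ, List.countP_append, Finset.range_add_one, Finset.filter_insert]
    by_cases h : q s = true
    · rw [if_pos h, Finset.card_insert_of_notMem (by simp)]
      simp [h, ih]
    · rw [if_neg h]
      simp [h, ih]

-- reindex a filtered-interval card to a range card
theorem pv_card_Ico_range (s : Nat) (p : Nat → Prop) [DecidablePred p] :
    ((Finset.Ico 1 (s + 1)).filter p).card = ((Finset.range s).filter (fun k => p (1 + k))).card := by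
  rw [Finset.card_filter, Finset.card_filter, Finset.sum_Ico_eq_sum_range]
  simp

-- B's count is the number of divisors ≤ √n
theorem pv_B_count (n : Nat) :
    ((PySem.List.pyRange 1 ((n.sqrt : Int) + 1) 1).countP (fun j => decide (PySem.Int.mod (n : Int) j = 0)))
      = ((Finset.Ico 1 (n.sqrt + 1)).filter (· ∣ n)).card := by
  rw [PySem.List.pyRange_one]
  have hs : (((n.sqrt : Int) + 1 - 1)).toNat = n.sqrt := by omega
  rw [hs, List.countP_map, pv_countP_card, pv_card_Ico_range]
  congr 1
  apply Finset.filter_congr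
  intro k _
  simp only [Function.comp, decide_eq_true_eq]
  rw [PySem.Int.mod_eq_zero_iff_dvd]
  have hcast : (1:ℤ) + (k:ℤ) = ((1 + k : ℕ) : ℤ) := by push_cast; ring
  rw [hcast, Int.natCast_dvd_natCast]

-- |D| = 2|S| - [n is a perfect square], via the pairing d ↦ n/d
theorem pv_card (n : Nat) (hn : 1 ≤ n) :
    ((Finset.Ico 1 (n + 1)).filter (· ∣ n)).card + (if n.sqrt * n.sqrt = n then 1 else 0)
      = 2 * ((Finset.Ico 1 (n.sqrt + 1)).filter (· ∣ n)).card := by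
  set D := (Finset.Ico 1 (n + 1)).filter (· ∣ n) with hD
  have hsplitcard : (D.filter (fun d => d * d ≤ n)).card + (D.filter (fun d => ¬ d * d ≤ n)).card = D.card :=
    Finset.card_filter_add_card_filter_not _
  have hLS : (D.filter (fun d => ¬ d * d ≤ n)).card
      = ((D.filter (fun d => d * d ≤ n)).filter (fun d => d * d ≠ n)).card := by
    refine (Finset.card_nbij' (fun d => n / d) (fun d => n / d) ?_ ?_ ?_ ?_).symm
    · intro d hd
      simp only [Finset.coe_filter, Set.mem_setOf_eq, hD, Finset.mem_filter, Finset.mem_Ico] at hd ⊢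
      obtain ⟨⟨⟨⟨hd1, _⟩, hdvd⟩, hdd⟩, hne⟩ := hd
      obtain ⟨c, hc⟩ := hdvd
      have hcd : n / d = c := by rw [hc]; exact Nat.mul_div_cancel_left c (by omega)
      have hc1 : 1 ≤ c := Nat.pos_of_ne_zero (by rintro rfl; simp at hc; omega)
      have hdd' : d * d < n := lt_of_le_of_ne hdd hne
      have hlt : d < c := by nlinarith
      rw [hcd]
      exact ⟨⟨⟨by omega, by nlinarith⟩, ⟨d, by rw [hc]; ring⟩⟩, by nlinarith⟩
    · intro d hd
      simp only [Finset.coe_filter, Set.mem_setOf_eq, hD, Finset.mem_filter, Finset.mem_Ico] at hd ⊢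
      obtain ⟨⟨⟨hd1, hd2⟩, hdvd⟩, hgt⟩ := hd
      obtain ⟨c, hc⟩ := hdvd
      have hcd : n / d = c := by rw [hc]; exact Nat.mul_div_cancel_left c (by omega)
      have hc1 : 1 ≤ c := Nat.pos_of_ne_zero (by rintro rfl; simp at hc; omega)
      have hgt' : n < d * d := Nat.lt_of_not_le hgt
      have hlt : c < d := by nlinarith
      rw [hcd]
      exact ⟨⟨⟨⟨by omega, by omega⟩, ⟨d, by rw [hc]; ring⟩⟩, by nlinarith⟩, by nlinarith⟩
    · intro d hd
      simp only [Finset.coe_filter, Set.mem_setOf_eq, hD, Finset.mem_filter, Finset.mem_Ico] at hd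
      exact Nat.div_div_self hd.1.1.2 (by omega)
    · intro d hd
      simp only [Finset.coe_filter, Set.mem_setOf_eq, hD, Finset.mem_filter, Finset.mem_Ico] at hd
      exact Nat.div_div_self hd.1.2 (by omega)
  have hSs : ((D.filter (fun d => d * d ≤ n)).filter (fun d => d * d ≠ n)).card
        + (if n.sqrt * n.sqrt = n then 1 else 0)
      = (D.filter (fun d => d * d ≤ n)).card := by
    by_cases hsq : n.sqrt * n.sqrt = n
    · rw [if_pos hsq]
      have hmem : n.sqrt ∈ D.filter (fun d => d * d ≤ n) := by
        simp only [hD, Finset.mem_filter, Finset.mem_Ico]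
        have h1 : 0 < n.sqrt := Nat.sqrt_pos.mpr (by omega)
        have hdvd : n.sqrt ∣ n := ⟨n.sqrt, hsq.symm⟩
        have := Nat.le_of_dvd (by omega) hdvd
        exact ⟨⟨⟨h1, by omega⟩, hdvd⟩, by omega⟩
      have herase : (D.filter (fun d => d * d ≤ n)).filter (fun d => d * d ≠ n)
          = (D.filter (fun d => d * d ≤ n)).erase n.sqrt := by
        ext d
        simp only [Finset.mem_filter, Finset.mem_erase]
        constructor
        · rintro ⟨h1, h2⟩
          refine ⟨?_, h1⟩
          rintro rfl
          exact h2 hsq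
        · rintro ⟨h1, h2⟩
          refine ⟨h2, ?_⟩
          intro hdd
          exact h1 (Nat.mul_self_inj.mp (by rw [hdd, hsq]))
      rw [herase, Finset.card_erase_of_mem hmem]
      have : 0 < (D.filter (fun d => d * d ≤ n)).card := Finset.card_pos.mpr ⟨n.sqrt, hmem⟩
      omega
    · rw [if_neg hsq]
      have : (D.filter (fun d => d * d ≤ n)).filter (fun d => d * d ≠ n)
          = D.filter (fun d => d * d ≤ n) := by
        apply Finset.filter_true_of_mem
        intro d hd hdd
        exact hsq (by rw [← hdd, Nat.sqrt_eq d])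
      rw [this]
      omega
  rw [pv_small_set n hn, ← hD]
  omega

-- closed form: the product of all divisors is n^(τ/2)·√n^(τ mod 2)
theorem pv_closed (n : Nat) (hn : 1 ≤ n) :
    (∏ d ∈ (Finset.Ico 1 (n + 1)).filter (· ∣ n), d)
      = n ^ (((Finset.Ico 1 (n + 1)).filter (· ∣ n)).card / 2)
        * (if ((Finset.Ico 1 (n + 1)).filter (· ∣ n)).card % 2 = 1 then n.sqrt else 1) := by
  have hDdiv : (Finset.Ico 1 (n + 1)).filter (· ∣ n) = n.divisors := Finset.val_inj.mp rfl
  rw [hDdiv]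
  set τ := n.divisors.card with hτ
  set P := ∏ d ∈ n.divisors, d with hP
  have hsq : P * P = n ^ τ := by
    have h1 : (∏ d ∈ n.divisors, n / d) = P := Nat.prod_div_divisors n id
    calc P * P = P * ∏ d ∈ n.divisors, n / d := by rw [h1]
      _ = ∏ d ∈ n.divisors, d * (n / d) := by rw [← Finset.prod_mul_distrib]
      _ = ∏ _d ∈ n.divisors, n := by
          refine Finset.prod_congr rfl ?_
          intro d hd
          exact Nat.mul_div_cancel' (Nat.mem_divisors.mp hd).1
      _ = n ^ τ := Finset.prod_const n
  by_cases hpar : τ % 2 = 1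
  · rw [if_pos hpar]
    have hsquare : n.sqrt * n.sqrt = n := by
      have := pv_card n hn
      rw [hDdiv] at this
      by_cases h : n.sqrt * n.sqrt = n
      · exact h
      · rw [if_neg h] at this; omega
    have hPr : P = n.sqrt ^ τ := by
      have h2 : P * P = (n.sqrt ^ τ) * (n.sqrt ^ τ) := by
        rw [hsq]
        calc n ^ τ = (n.sqrt * n.sqrt) ^ τ := by rw [hsquare]
          _ = (n.sqrt ^ τ) * (n.sqrt ^ τ) := by ring
      exact Nat.mul_self_inj.mp h2
    obtain ⟨k, hk⟩ : ∃ k, τ = 2 * k + 1 := ⟨τ / 2, by omega⟩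
    have hk2 : τ / 2 = k := by omega
    rw [hPr, hk2, hk]
    calc n.sqrt ^ (2 * k + 1) = (n.sqrt * n.sqrt) ^ k * n.sqrt := by ring
      _ = n ^ k * n.sqrt := by rw [hsquare]
  · rw [if_neg hpar, mul_one]
    have hτeq : τ = 2 * (τ / 2) := by omega
    have : P * P = (n ^ (τ / 2)) * (n ^ (τ / 2)) := by
      rw [hsq]
      calc n ^ τ = n ^ (2 * (τ / 2)) := by rw [← hτeq]
        _ = n ^ (τ / 2) * n ^ (τ / 2) := by ring
    exact Nat.mul_self_inj.mp this

-- ===== VERDICT (by name: the statement is the Claim_ definition above) =====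
theorem divisorProduct_spec : Claim_equal_divisorProduct := by
  intro N _
  unfold Spec_divisorProduct divisorProduct divisorProduct_alt
  by_cases hN : 1 ≤ N
  · obtain ⟨n, rfl⟩ : ∃ n : Nat, N = ↑n := ⟨N.toNat, (Int.toNat_of_nonneg (by omega)).symm⟩
    have hn : 1 ≤ n := by exact_mod_cast hN
    rw [if_neg (by omega)]
    -- A's side: the loop is the product of all divisors
    rw [pv_loop_eq n (((n.sqrt : Int) + 1 - 1).toNat) 1 1 le_rfl rfl]
    have hA : (fun (p j : Int) => if PySem.Int.mod (n : Int) j = 0 then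
          (if j ≠ PySem.Int.floordiv (n : Int) j then (p * j) * PySem.Int.floordiv (n : Int) j else p * j)
        else p) = fun p j => p * pvGA (n : Int) j := by
      funext p j; simp only [pvGA]; split_ifs <;> ring
    rw [hA, pv_foldl_mul, pv_A_prod n hn, pv_core n hn, one_mul]
    -- B's side: the loop is (count of small divisors, √n)
    rw [pv_altloop_eq n (((n.sqrt : Int) + 1 - 1).toNat) 1 0 0 le_rfl rfl]
    have hsqrt1 : 1 ≤ n.sqrt := Nat.sqrt_pos.mpr (by omega)
    rw [if_pos (by exact_mod_cast hsqrt1)]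
    have hBc : (fun (c j : Int) => if PySem.Int.mod (n : Int) j = 0 then c + 1 else c)
        = fun acc x => if (fun j => decide (PySem.Int.mod (n : Int) j = 0)) x = true then acc + 1 else acc := by
      funext c j
      by_cases h : PySem.Int.mod (n : Int) j = 0 <;> simp [h]
    rw [hBc, PySem.List.foldl_count_if, pv_B_count n, zero_add]
    -- name the Nat quantities
    set cs := ((Finset.Ico 1 (n.sqrt + 1)).filter (· ∣ n)).card with hcs
    set τ := ((Finset.Ico 1 (n + 1)).filter (· ∣ n)).card with hτd
    have hcard := pv_card n hn
    rw [← hcs, ← hτd] at hcard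
    simp only []
    -- the indicator over Int equals the Nat one
    have hind : (if ((n.sqrt : Int)) * ((n.sqrt : Int)) = (n : Int) then (1:Int) else 0)
        = ((if n.sqrt * n.sqrt = n then 1 else 0 : Nat) : Int) := by
      by_cases h : n.sqrt * n.sqrt = n
      · rw [if_pos h, if_pos (by exact_mod_cast h)]; rfl
      · rw [if_neg h, if_neg (by exact_mod_cast (fun hc => h (by exact_mod_cast hc)))]; rfl
    rw [hind]
    have ht : 2 * ((cs : Nat) : Int) - ((if n.sqrt * n.sqrt = n then 1 else 0 : Nat) : Int) = ((τ : Nat) : Int) := by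
      push_cast
      omega
    rw [ht]
    have hM : (0:Int) < 10 ^ 9 + 7 := by norm_num
    have hfd2 : (PySem.Int.floordiv ((τ : Nat) : Int) 2).toNat = τ / 2 := by
      rw [PySem.Int.floordiv_eq_ediv_of_pos (by norm_num)]
      omega
    have hmod2 : PySem.Int.mod ((τ : Nat) : Int) 2 = ((τ % 2 : Nat) : Int) := by
      rw [PySem.Int.mod_eq_emod_of_pos (by norm_num)]
      omega
    rw [hfd2, hmod2, PySem.Int.powMod_eq_emod _ _ hM,
        PySem.Int.mod_eq_emod_of_pos hM, PySem.Int.mod_eq_emod_of_pos hM]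
    -- both sides: P % M vs (n^(τ/2) % M * s) % M with P = n^(τ/2)·s
    have hPval := pv_closed n hn
    rw [← hτd] at hPval
    rw [hPval]
    push_cast
    have hiff : (((τ:ℕ):ℤ) % 2 = 1) ↔ (τ % 2 = 1) := by omega
    simp only [hiff]
    conv_lhs => rw [Int.mul_emod]
    conv_rhs => rw [Int.mul_emod]
    rw [Int.emod_emod_of_dvd _ dvd_rfl]
  · -- N ≤ 0 : A's loop body never runs; B takes its N < 1 branch; both are 1 % MOD
    have h1 : ¬ ((1 : Int) * 1 ≤ N) := by omega
    rw [divisorProductLoop, dif_neg h1, if_pos (by omega)]
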